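-- pv_equiv track=rewrite | github.com/ml4ai/automates | automates/program_analysis/Py2GrFN/cast_utils.py | generate_decision_lambda
-- ===== SOURCE A (Python) =====
-- import ast
--
-- def generate_decision_lambda(node: ast.If, cond_vars, conditions_updating_var, name, \
--         is_val_set_in_else):
--     all_vars = []
--
--     cur_var_num = 0
--     else_string = ""
--     lambda_body_string = ""
--     group = []
--     for var in cond_vars:
--         group.append(var)
--         all_vars.append(var)
--         if var in conditions_updating_var:
--             lambda_var = name + "_" + str(cur_var_num)
--             cur_var_num += 1
--             all_vars.append(lambda_var)
--
--             lambda_body_string += else_string + lambda_var + " if " \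
--                 + " and not ".join(group[:-1]) \
--                 + (" and " if len(group) > 1 else "") + group[-1]
--
--             else_string = " else "
--             group = []
--
--     if is_val_set_in_else:
--         else_var =  name + "_" + str(cur_var_num)
--         all_vars.append(else_var)
--         lambda_body_string += " else "  + else_var
--     else:
--         lambda_body_string += " else None"
--
--     return "lambda " + ",".join(all_vars) + ": " + lambda_body_string
-- ===== SOURCE B (Python) =====
-- def generate_decision_lambda(node, cond_vars, conditions_updating_var, name,
--         is_val_set_in_else):
--     # Partition cond_vars right-to-left into segments, each ending at a
--     # variable that updates the target; vars after the last such variable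
--     # form the trailing tail (they get no clause, only a lambda parameter).
--     updating = set(conditions_updating_var)
--     segs = []
--     tail = []
--     for v in reversed(cond_vars):
--         if v in updating:
--             segs.insert(0, [v])
--         elif segs:
--             segs[0].insert(0, v)
--         else:
--             tail.insert(0, v)
--
--     def clause(k, g):
--         return (name + "_" + str(k) + " if "
--                 + " and not ".join(g[:-1])
--                 + (" and " if len(g) > 1 else "") + g[-1])
--
--     body = " else ".join(clause(k, g) for k, g in enumerate(segs))
--     all_vars = [x for k, g in enumerate(segs)
--                 for x in g + [name + "_" + str(k)]] + tail
--
--     if is_val_set_in_else: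
--         else_var = name + "_" + str(len(segs))
--         all_vars.append(else_var)
--         body += " else " + else_var
--     else:
--         body += " else None"
--
--     return "lambda " + ",".join(all_vars) + ": " + body
-- ===== Notes on version B (the rewrite author's own statement) =====
-- stated objective: faster
-- what changed: A threads five pieces of mutable state (var list, counter, else-glue, body string, current group) through one left-to-right loop with an O(m) list-membership scan per variable; B first partitions cond_vars right-to-left into clause segments, testing membership against a set built once, and then derives the clause strings, the parameter list and the body from that segment list by enumeration and joins.
import Mathlib
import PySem

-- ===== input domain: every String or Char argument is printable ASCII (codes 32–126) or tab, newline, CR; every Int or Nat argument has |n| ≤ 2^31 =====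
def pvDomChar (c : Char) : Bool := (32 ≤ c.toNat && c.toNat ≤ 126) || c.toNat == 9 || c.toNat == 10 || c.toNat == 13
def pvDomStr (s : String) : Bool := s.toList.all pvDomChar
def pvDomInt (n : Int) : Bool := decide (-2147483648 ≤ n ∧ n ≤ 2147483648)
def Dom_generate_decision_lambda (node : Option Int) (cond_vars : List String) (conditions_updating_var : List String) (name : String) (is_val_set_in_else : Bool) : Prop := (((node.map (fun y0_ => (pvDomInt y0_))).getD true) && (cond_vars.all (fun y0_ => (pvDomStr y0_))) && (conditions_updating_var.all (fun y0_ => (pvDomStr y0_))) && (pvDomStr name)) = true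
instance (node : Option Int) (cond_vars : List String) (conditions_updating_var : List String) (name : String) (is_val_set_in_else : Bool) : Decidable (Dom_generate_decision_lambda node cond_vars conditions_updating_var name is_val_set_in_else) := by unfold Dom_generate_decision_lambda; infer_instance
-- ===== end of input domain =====

-- B builds the same lambda string by first partitioning cond_vars into clause segments
-- (right-to-left) and then formatting clauses/parameters from the segment list, instead of
-- A's single left-to-right loop that threads five pieces of mutable string/list state;
-- B tests membership against a set built once instead of rescanning the list per variable
-- (objective: faster, measured; no argument is mutated).

-- ===== PORT A =====
-- one iteration of A's for-loop over cond_vars; state = (all_vars, cur_var_num, else_string, lambda_body_string, group)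
def pvAStep (cuv : List String) (name : String)
    (st : List String × Int × String × String × List String) (v : String) :
    List String × Int × String × String × List String :=
  match st with
  | (all_vars, cur_var_num, else_string, lambda_body_string, group) =>
    let group := group ++ [v]
    let all_vars := all_vars ++ [v]
    if cuv.contains v then
      let lambda_var := name ++ "_" ++ PySem.Int.toStr cur_var_num
      (all_vars ++ [lambda_var], cur_var_num + 1, " else ",
       lambda_body_string ++ else_string ++ lambda_var ++ " if "
         ++ PySem.Str.join " and not " group.dropLast          -- group[:-1]
         ++ (if 1 < group.length then " and " else "")
         ++ group.getLastD "",                                  -- group[-1]; group is nonempty here, default never used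
       [])
    else
      (all_vars, cur_var_num, else_string, lambda_body_string, group)

def generate_decision_lambda (node : Option Int) (cond_vars : List String) (conditions_updating_var : List String) (name : String) (is_val_set_in_else : Bool) : String :=
  let st := cond_vars.foldl (pvAStep conditions_updating_var name) ([], 0, "", "", [])
  let all_vars := st.1
  let cur_var_num := st.2.1
  let lambda_body_string := st.2.2.2.1
  let (all_vars, lambda_body_string) :=
    if is_val_set_in_else then
      let else_var := name ++ "_" ++ PySem.Int.toStr cur_var_num
      (all_vars ++ [else_var], lambda_body_string ++ " else " ++ else_var)
    else
      (all_vars, lambda_body_string ++ " else None")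
  "lambda " ++ PySem.Str.join "," all_vars ++ ": " ++ lambda_body_string

-- ===== PORT B =====
-- right-to-left partition of cond_vars: (segments each ending at an updating var, trailing tail)
def pvSplit (updating : PySem.Set String) (vs : List String) : List (List String) × List String :=
  vs.foldr (fun v st =>
    if PySem.Set.contains updating v then ([v] :: st.1, st.2)
    else match st.1 with
      | [] => ([], v :: st.2)
      | s :: rest => ((v :: s) :: rest, st.2)) ([], [])

def pvLam (name : String) (n : Int) : String := name ++ "_" ++ PySem.Int.toStr n

def pvClause (name : String) (n : Int) (g : List String) : String :=
  pvLam name n ++ " if "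
    ++ PySem.Str.join " and not " g.dropLast
    ++ (if 1 < g.length then " and " else "")
    ++ g.getLastD ""    -- g[-1]; every segment is nonempty, default never used

-- clause(k, g) over enumerate(segs): counter recursion
def pvClauses (name : String) (n : Int) : List (List String) → List String
  | [] => []
  | g :: ss => pvClause name n g :: pvClauses name (n + 1) ss

-- [x for k, g in enumerate(segs) for x in g + [name_k]]: counter recursion
def pvVars (name : String) (n : Int) : List (List String) → List String
  | [] => []
  | g :: ss => g ++ pvLam name n :: pvVars name (n + 1) ss

def generate_decision_lambda_alt (node : Option Int) (cond_vars : List String) (conditions_updating_var : List String) (name : String) (is_val_set_in_else : Bool) : String :=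
  let st := pvSplit (PySem.Set.ofList conditions_updating_var) cond_vars
  let segs := st.1
  let tail := st.2
  let body := PySem.Str.join " else " (pvClauses name 0 segs)
  let all_vars := pvVars name 0 segs ++ tail
  if is_val_set_in_else then
    let else_var := pvLam name (segs.length : Int)
    "lambda " ++ PySem.Str.join "," (all_vars ++ [else_var]) ++ ": " ++ (body ++ " else " ++ else_var)
  else
    "lambda " ++ PySem.Str.join "," all_vars ++ ": " ++ (body ++ " else None")

-- ===== PRECONDITION & SPEC =====
def Spec_generate_decision_lambda (node : Option Int) (cond_vars : List String) (conditions_updating_var : List String) (name : String) (is_val_set_in_else : Bool) (out : String) : Prop := out = generate_decision_lambda_alt node cond_vars conditions_updating_var name is_val_set_in_else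
instance (node : Option Int) (cond_vars : List String) (conditions_updating_var : List String) (name : String) (is_val_set_in_else : Bool) (out : String) : Decidable (Spec_generate_decision_lambda node cond_vars conditions_updating_var name is_val_set_in_else out) := by unfold Spec_generate_decision_lambda; infer_instance

-- ===== CLAIM (what is proved, stated in full; the proofs are below) =====
def Claim_equal_generate_decision_lambda : Prop := ∀ (node : Option Int) (cond_vars : List String) (conditions_updating_var : List String) (name : String) (is_val_set_in_else : Bool), Dom_generate_decision_lambda node cond_vars conditions_updating_var name is_val_set_in_else → Spec_generate_decision_lambda node cond_vars conditions_updating_var name is_val_set_in_else (generate_decision_lambda node cond_vars conditions_updating_var name is_val_set_in_else)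

-- ===== LEMMAS AND PROOFS =====

theorem pv_join_cons₂ (sep a b : String) (l : List String) :
    PySem.Str.join sep (a :: b :: l) = a ++ sep ++ PySem.Str.join sep (b :: l) := by
  simp [PySem.Str.join, PySem.Chars.join_cons_cons, String.ofList_append,
    String.ofList_toList, String.append_assoc]

theorem pv_join_one (sep a : String) : PySem.Str.join sep [a] = a := by
  simp [PySem.Str.join, PySem.Chars.join_singleton]

theorem pvSplit_cons (u : PySem.Set String) (v : String) (rest : List String) :
    pvSplit u (v :: rest) =
      (if PySem.Set.contains u v then ([v] :: (pvSplit u rest).1, (pvSplit u rest).2)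
       else match (pvSplit u rest).1 with
         | [] => ([], v :: (pvSplit u rest).2)
         | s :: r => ((v :: s) :: r, (pvSplit u rest).2)) := rfl


-- Loop invariant: A's fold from a state whose pending group is trigger-free is described
-- by B's partition of the remaining input.
theorem pvAStep_loop (cuv : List String) (name : String) :
    ∀ (vs av : List String) (n : Int) (es body : String) (g : List String),
      (∀ x ∈ g, cuv.contains x = false) →
      vs.foldl (pvAStep cuv name) (av, n, es, body, g) =
        (match pvSplit (PySem.Set.ofList cuv) vs with
         | ([], t) => (av ++ t, n, es, body, g ++ t)
         | (s :: ss, t) =>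
             (av ++ pvVars name n (s :: ss) ++ t, n + ((s :: ss).length : Int), " else ",
              body ++ es ++ PySem.Str.join " else " (pvClauses name n ((g ++ s) :: ss)), t)) := by
  intro vs
  induction vs with
  | nil => intro av n es body g _; simp [pvSplit]
  | cons v rest ih =>
    intro av n es body g hg
    rcases h : pvSplit (PySem.Set.ofList cuv) rest with ⟨ss, t⟩
    by_cases hv : cuv.contains v = true
    · have hvm : v ∈ cuv := by simpa using hv
      have hstep : pvAStep cuv name (av, n, es, body, g) v =
          (av ++ [v] ++ [pvLam name n], n + 1, " else ",
           body ++ es ++ pvClause name n (g ++ [v]), []) := by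
        simp [pvAStep, hvm, pvClause, pvLam, String.append_assoc]
      have hsplit : pvSplit (PySem.Set.ofList cuv) (v :: rest) = ([v] :: ss, t) := by
        rw [pvSplit_cons, h]; simp [hvm]
      rw [List.foldl_cons, hstep, ih _ _ _ _ _ (by simp), hsplit, h]
      cases ss with
      | nil =>
        simp [pvVars, pvClauses, pv_join_one, String.append_assoc, List.append_assoc]
      | cons s' ss' =>
        simp only [pvVars, pvClauses, pv_join_cons₂, List.nil_append]
        refine Prod.ext ?_ (Prod.ext ?_ (Prod.ext rfl (Prod.ext ?_ rfl)))
        · simp [List.append_assoc]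
        · simp only [List.length_cons]; push_cast; ring
        · simp [String.append_assoc]
    · have hv' : cuv.contains v = false := by simpa using hv
      have hvm : v ∉ cuv := by simpa using hv
      have hstep : pvAStep cuv name (av, n, es, body, g) v =
          (av ++ [v], n, es, body, g ++ [v]) := by
        simp [pvAStep, hvm]
      have hg' : ∀ x ∈ g ++ [v], cuv.contains x = false := by
        intro x hx; rcases List.mem_append.1 hx with hx | hx
        · exact hg x hx
        · simp at hx; subst hx; exact hv'
      rw [List.foldl_cons, hstep, ih _ _ _ _ _ hg']
      cases ss with
      | nil =>
        have hsplit : pvSplit (PySem.Set.ofList cuv) (v :: rest) = ([], v :: t) := by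
          rw [pvSplit_cons, h]; simp [hvm]
        rw [h, hsplit]; simp
      | cons s' ss' =>
        have hsplit : pvSplit (PySem.Set.ofList cuv) (v :: rest) = ((v :: s') :: ss', t) := by
          rw [pvSplit_cons, h]; simp [hvm]
        rw [h, hsplit]
        simp only [pvVars, pvClauses]
        refine Prod.ext ?_ (Prod.ext ?_ (Prod.ext rfl (Prod.ext ?_ rfl)))
        · simp [List.append_assoc]
        · rfl
        · have : g ++ [v] ++ s' = g ++ (v :: s') := by simp [List.append_assoc]
          rw [this]

-- ===== VERDICT (by name: the statement is the Claim_ definition above) =====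
theorem generate_decision_lambda_spec : Claim_equal_generate_decision_lambda := by
  intro node cond_vars cuv name b _
  unfold Spec_generate_decision_lambda generate_decision_lambda generate_decision_lambda_alt
  rw [pvAStep_loop cuv name cond_vars [] 0 "" "" [] (by simp)]
  rcases h : pvSplit (PySem.Set.ofList cuv) cond_vars with ⟨ss, t⟩
  cases ss with
  | nil =>
    cases b <;> simp [pvClauses, pvVars, PySem.Str.join, PySem.Chars.join_nil, pvLam]
  | cons s ss' =>
    cases b <;>
      simp [pvVars, pvClauses, String.append_assoc, pvLam]
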